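-- pv_equiv track=rewrite | github.com/Joanna-O-Ben/Rosalind-Bioinformatics-Stronghold-Homework-4-and-5 | cons.py | profilecount
-- ===== SOURCE A (Python) =====
-- def profilecount(fragmentarray, base):
--     basecount = base + ":"
--     for stringslice in range(len(fragmentarray[0])):
--         count = 0
--         for frag in fragmentarray:
--             if frag[stringslice] == base:
--                 count += 1
--         basecount += " "
--         basecount += str(count)
--     return basecount
-- ===== SOURCE B (Python) =====
-- def profilecount(fragmentarray, base):
--     # One pass over the rows: maintain a vector of per-column counters,
--     # updated for a whole row at once via zip (truncated to the first row's width).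
--     counts = [0] * len(fragmentarray[0])
--     for frag in fragmentarray:
--         counts = [c + (ch == base) for c, ch in zip(counts, frag)]
--     return base + ":" + "".join(" " + str(c) for c in counts)
-- ===== Notes on version B (the rewrite author's own statement) =====
-- stated objective: alternative
-- what changed: A loops column-by-column, rescanning every row per column with a scalar counter; B makes a single row-major pass maintaining a vector of per-column counters updated via zip, then formats once.
import Mathlib
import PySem

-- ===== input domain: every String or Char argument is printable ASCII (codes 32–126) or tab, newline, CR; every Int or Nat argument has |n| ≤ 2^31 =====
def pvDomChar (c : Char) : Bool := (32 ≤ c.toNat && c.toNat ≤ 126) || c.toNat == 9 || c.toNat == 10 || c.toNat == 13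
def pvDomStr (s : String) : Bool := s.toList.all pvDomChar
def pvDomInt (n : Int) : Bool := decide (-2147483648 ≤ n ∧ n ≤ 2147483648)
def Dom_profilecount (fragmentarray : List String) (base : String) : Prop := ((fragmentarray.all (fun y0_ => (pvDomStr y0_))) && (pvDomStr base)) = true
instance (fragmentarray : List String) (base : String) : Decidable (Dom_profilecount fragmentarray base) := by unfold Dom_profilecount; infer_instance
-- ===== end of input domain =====

-- B replaces A's column-by-column rescans of all rows by ONE row-major pass maintaining a
-- vector of per-column counters updated via zip, then a single formatting join (objective:
-- alternative; same asymptotic cost).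

-- ===== PORT A =====
-- Literal port of A: outer loop over range(len(fragmentarray[0])), inner loop counting
-- frag[stringslice] == base, appending " " + str(count).  (headD "" only totalizes the
-- fragmentarray[0] access; A raises IndexError there, excluded by Pre_; frag[stringslice]
-- is pyGet?, none = IndexError on ragged input, also excluded by Pre_.)
def profilecount (fragmentarray : List String) (base : String) : String :=
  let n : Int := ((fragmentarray.headD "").toList.length : Int)
  String.mk ((PySem.List.pyRange 0 n 1).foldl (fun acc i =>
    let count : Int := fragmentarray.foldl (fun c frag =>
      if (PySem.Str.pyGet? frag i).map (fun ch => [ch]) = some base.toList then c + 1 else c) 0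
    acc ++ [' '] ++ PySem.Int.toChars count) (base.toList ++ [':']))

-- ===== PORT B =====
-- Literal port of B: counts = [0]*len(fragmentarray[0]); one pass over the rows replacing
-- counts by [c + (ch == base) for c, ch in zip(counts, frag)] (zip = List.zipWith, which
-- truncates like Python's zip; ch == base compares the 1-char string, i.e. [ch] = base.toList);
-- then base + ":" + "".join(" " + str(c) for c in counts).
def profilecount_alt (fragmentarray : List String) (base : String) : String :=
  let counts0 : List Int := List.replicate (fragmentarray.headD "").toList.length 0
  let counts : List Int := fragmentarray.foldl (fun cs frag =>
    List.zipWith (fun c ch => c + (if [ch] == base.toList then (1 : Int) else 0)) cs frag.toList) counts0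
  String.mk (base.toList ++ [':'] ++ (counts.map (fun c => ' ' :: PySem.Int.toChars c)).flatten)

-- ===== PRECONDITION & SPEC =====
-- Pre_ excludes exactly the inputs where A raises IndexError: the empty list
-- (fragmentarray[0]) and ragged inputs with a row shorter than the first row (frag[stringslice]).
def Pre_profilecount (fragmentarray : List String) (base : String) : Prop :=
  fragmentarray ≠ [] ∧ ∀ s ∈ fragmentarray, (fragmentarray.headD "").toList.length ≤ s.toList.length
instance (fragmentarray : List String) (base : String) : Decidable (Pre_profilecount fragmentarray base) := by unfold Pre_profilecount; infer_instance
def pvWitness_profilecount : List String × String := (["ACG", "AAT"], "A")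

def Spec_profilecount (fragmentarray : List String) (base : String) (out : String) : Prop := out = profilecount_alt fragmentarray base
instance (fragmentarray : List String) (base : String) (out : String) : Decidable (Spec_profilecount fragmentarray base out) := by unfold Spec_profilecount; infer_instance

-- ===== CLAIM (what is proved, stated in full; the proofs are below) =====
def Claim_equal_profilecount : Prop := ∀ (fragmentarray : List String) (base : String), Dom_profilecount fragmentarray base → Pre_profilecount fragmentarray base → Spec_profilecount fragmentarray base (profilecount fragmentarray base)

-- ===== LEMMAS AND PROOFS =====

-- A's inner counting foldl is a countP
theorem pv_foldl_count {α : Type} (l : List α) (p : α → Prop) [DecidablePred p] :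
    ∀ (k : Int), l.foldl (fun c x => if p x then c + 1 else c) k
      = k + ((l.countP (fun x => decide (p x)) : Nat) : Int) := by
  induction l with
  | nil => intro k; simp
  | cons x xs ih =>
    intro k
    by_cases hx : p x <;> simp [hx, ih] <;> ring

-- A's appending foldl is a flatten
theorem pv_foldl_flatten {α : Type} (l : List α) (g : α → List Char) :
    ∀ (acc : List Char), l.foldl (fun a x => a ++ g x) acc = acc ++ (l.map g).flatten := by
  induction l with
  | nil => intro acc; simp
  | cons x xs ih => intro acc; simp [ih]

-- B's row-major counter fold, characterised column by column: starting from any counter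
-- vector cs whose length every row covers, the result is cs[k] + (number of rows whose
-- k-th character equals base), for each column k.
theorem pv_fold_zip (base : String) :
    ∀ (fa : List String) (cs : List Int),
      (∀ frag ∈ fa, cs.length ≤ frag.toList.length) →
      fa.foldl (fun cs frag =>
          List.zipWith (fun c ch => c + (if [ch] == base.toList then (1 : Int) else 0)) cs frag.toList) cs
        = (List.range cs.length).map (fun k =>
            cs.getD k 0 + ((fa.countP (fun frag => [frag.toList.getD k ' '] == base.toList) : Nat) : Int)) := by
  intro fa
  induction fa with
  | nil =>
    intro cs _
    simp only [List.foldl_nil, List.countP_nil]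
    apply List.ext_getElem (by simp)
    intro k h1 h2
    simp [List.getD, List.getElem?_eq_getElem h1]
  | cons f rest ih =>
    intro cs hlen
    have hf : cs.length ≤ f.toList.length := hlen f (by simp)
    have hlen' : (List.zipWith (fun c ch => c + (if [ch] == base.toList then (1 : Int) else 0)) cs f.toList).length = cs.length := by
      rw [List.length_zipWith]; exact Nat.min_eq_left hf
    rw [List.foldl_cons, ih _ (by intro frag hfrag; rw [hlen']; exact hlen frag (List.mem_cons_of_mem _ hfrag))]
    rw [hlen']
    apply List.map_congr_left
    intro k hk
    have hk' : k < cs.length := List.mem_range.mp hk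
    have hkf : k < f.toList.length := lt_of_lt_of_le hk' hf
    have hz : (List.zipWith (fun c ch => c + (if [ch] == base.toList then (1 : Int) else 0)) cs f.toList).getD k 0
        = cs.getD k 0 + (if [f.toList.getD k ' '] == base.toList then (1 : Int) else 0) := by
      rw [List.getD_eq_getElem _ _ (by rw [hlen']; exact hk'),
          List.getD_eq_getElem _ _ hk', List.getD_eq_getElem _ _ hkf,
          List.getElem_zipWith]
    rw [hz, List.countP_cons]
    by_cases hb : [f.toList.getD k ' '] = base.toList <;> simp [hb] <;> push_cast <;> ring


theorem profilecount_spec : Claim_equal_profilecount := by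
  unfold Claim_equal_profilecount
  intro fa base _ hpre
  obtain ⟨hne, hlen⟩ := hpre
  simp only [Spec_profilecount, profilecount, profilecount_alt]
  -- B side: characterise the counter fold
  rw [pv_fold_zip base fa (List.replicate (fa.headD "").toList.length 0)
        (by intro frag hfrag; rw [List.length_replicate]; exact hlen frag hfrag)]
  simp only [List.length_replicate]
  -- A side: range, flatten, countP
  rw [PySem.List.pyRange_zero_nat, List.foldl_map]
  simp only [List.append_assoc]
  rw [pv_foldl_flatten (List.range (fa.headD "").toList.length)
        (fun k => [' '] ++ PySem.Int.toChars
          (fa.foldl (fun c frag =>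
            if (PySem.Str.pyGet? frag (k : Int)).map (fun ch => [ch]) = some (base.toList) then c + 1 else c) 0))
        (base.toList ++ [':'])]
  simp only [List.append_assoc]
  congr 3
  rw [List.map_map]
  congr 1
  apply List.map_congr_left
  intro k hk
  have hk' : k < (fa.headD "").toList.length := List.mem_range.mp hk
  have h0 : (List.replicate (fa.headD "").toList.length (0 : Int)).getD k 0 = 0 := by
    rw [List.getD_eq_getElem _ _ (by simpa using hk')]; simp
  simp only [Function.comp, h0, zero_add]
  rw [pv_foldl_count fa
      (fun frag => (PySem.Str.pyGet? frag (k : Int)).map (fun ch => [ch]) = some (base.toList)), zero_add]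
  simp only [List.singleton_append]
  congr 3
  apply List.countP_congr
  intro frag hfrag
  have hlt : k < frag.toList.length := lt_of_lt_of_le hk' (hlen frag hfrag)
  rw [PySem.Str.pyGet?_natCast, List.getElem?_eq_getElem hlt, List.getD_eq_getElem _ _ hlt]
  simp
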